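-- pv_equiv track=rewrite | github.com/dhana507/GIGA | Coding Meetup #9 - Higher-Order Functions Series - Is the meetup age-diverse?.py | is_age_diverse
-- ===== SOURCE A (Python) =====
-- def is_age_diverse(lst):
--     # your code here
--     age_groups = {
--         'teens': range(13, 20),
--         'twenties': range(20, 30),
--         'thirties': range(30, 40),
--         'forties': range(40, 50),
--         'fifties': range(50, 60),
--         'sixties': range(60, 70),
--         'seventies': range(70, 80),
--         'eighties': range(80, 90),
--         'nineties': range(90, 100),
--         'centenarian': range(100, 200),
--     }
--
--     for age_group, age_range in age_groups.items():
--         if not any(dev['age'] in age_range for dev in lst):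
--             return False
--
--     return True
-- ===== SOURCE B (Python) =====
-- def is_age_diverse(lst):
--     # single pass: collect decade keys 1..9 (ages 13-99) and 10 (100-199),
--     # return True as soon as all ten keys are present
--     seen = set()
--     for dev in lst:
--         a = dev['age']
--         if 13 <= a < 100:
--             seen.add(a // 10)
--         elif 100 <= a < 200:
--             seen.add(10)
--         if len(seen) == 10:
--             return True
--     return False
-- ===== Notes on version B (the rewrite author's own statement) =====
-- stated objective: simpler
-- what changed: One pass over the list collecting decade keys in a set with an early return when all ten are present, instead of ten separate any() scans over the whole list.
import Mathlib
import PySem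

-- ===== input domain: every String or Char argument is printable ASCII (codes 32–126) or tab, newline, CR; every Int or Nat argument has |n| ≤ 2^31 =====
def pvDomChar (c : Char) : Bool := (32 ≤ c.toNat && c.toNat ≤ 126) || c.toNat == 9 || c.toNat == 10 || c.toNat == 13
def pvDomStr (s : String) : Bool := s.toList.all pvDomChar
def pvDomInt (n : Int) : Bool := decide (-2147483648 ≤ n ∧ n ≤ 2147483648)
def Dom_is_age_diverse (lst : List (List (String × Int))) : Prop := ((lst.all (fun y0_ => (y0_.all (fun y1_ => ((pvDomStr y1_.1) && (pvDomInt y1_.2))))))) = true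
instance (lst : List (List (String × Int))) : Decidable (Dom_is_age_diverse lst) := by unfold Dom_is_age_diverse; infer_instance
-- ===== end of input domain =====

-- B replaces A's ten any() scans over the whole list by a single pass that collects
-- decade keys in a set and returns early once all ten are present (objective: simpler).


-- ===== PORT A =====
-- the ten age_groups ranges, in A's iteration order, as (lo, hi) with membership lo ≤ a < hi
def ageGroups : List (Int × Int) :=
  [(13,20),(20,30),(30,40),(40,50),(50,60),(60,70),(70,80),(80,90),(90,100),(100,200)]

-- dev['age']; the default 0 is never used inside Pre_ (every dev has the key there)
def ageOf (dev : List (String × Int)) : Int := ((PySem.Dict.mk dev).get? "age").getD 0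

def is_age_diverse (lst : List (List (String × Int))) : Bool :=
  ageGroups.all (fun r => lst.any (fun dev => decide (r.1 ≤ ageOf dev) && decide (ageOf dev < r.2)))

-- ===== PORT B =====
def bucketStep (seen : PySem.Set Int) (a : Int) : PySem.Set Int :=
  if 13 ≤ a ∧ a < 100 then PySem.Set.add seen (PySem.Int.floordiv a 10)
  else if 100 ≤ a ∧ a < 200 then PySem.Set.add seen 10
  else seen

def altGo : List (List (String × Int)) → PySem.Set Int → Bool
  | [], _ => false
  | dev :: rest, seen =>
      let seen' := bucketStep seen (ageOf dev)
      if PySem.Set.len seen' = 10 then true else altGo rest seen'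

def is_age_diverse_alt (lst : List (List (String × Int))) : Bool :=
  altGo lst PySem.Set.empty

-- ===== PRECONDITION & SPEC =====
-- Pre_ excludes lists in which some dev lacks the key 'age': there A raises KeyError —
-- except in the corner where every such dev appears only after all ten decades have already
-- been matched, where A's lazy any() scans return True without ever touching it (an artefact
-- of scan order; B returns True there too).
def Pre_is_age_diverse (lst : List (List (String × Int))) : Prop :=
  ∀ dev ∈ lst, "age" ∈ dev.map Prod.fst
instance (lst : List (List (String × Int))) : Decidable (Pre_is_age_diverse lst) := by
  unfold Pre_is_age_diverse; infer_instance

def pvWitness_is_age_diverse : (List (List (String × Int))) :=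
  [[("age", 15)], [("age", 25)], [("age", 35)], [("age", 45)], [("age", 55)],
   [("age", 65)], [("age", 75)], [("age", 85)], [("age", 95)], [("age", 150)]]

def Spec_is_age_diverse (lst : List (List (String × Int))) (out : Bool) : Prop := out = is_age_diverse_alt lst
instance (lst : List (List (String × Int))) (out : Bool) : Decidable (Spec_is_age_diverse lst out) := by unfold Spec_is_age_diverse; infer_instance

-- ===== CLAIM (what is proved, stated in full; the proofs are below) =====
def Claim_equal_is_age_diverse : Prop := ∀ (lst : List (List (String × Int))), Dom_is_age_diverse lst → Pre_is_age_diverse lst → Spec_is_age_diverse lst (is_age_diverse lst)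

-- ===== LEMMAS AND PROOFS =====
-- the decade key a dev's age contributes, if any
def keyOf (a : Int) : Option Int :=
  if 13 ≤ a ∧ a < 100 then some (a / 10)
  else if 100 ≤ a ∧ a < 200 then some 10
  else none

def keysOf (lst : List (List (String × Int))) : List Int := lst.filterMap (fun dev => keyOf (ageOf dev))

def allKeys : List Int := [1,2,3,4,5,6,7,8,9,10]

lemma bucketStep_eq (seen : PySem.Set Int) (a : Int) :
    bucketStep seen a = match keyOf a with
      | some k => PySem.Set.add seen k
      | none => seen := by
  unfold bucketStep keyOf
  split_ifs with h1 h2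
  · rw [PySem.Int.floordiv_eq_ediv_of_pos (by norm_num : (0:Int) < 10)]
  · rfl
  · rfl

lemma mem_bucketStep (seen : PySem.Set Int) (a y : Int) :
    y ∈ bucketStep seen a ↔ y ∈ seen ∨ keyOf a = some y := by
  rw [bucketStep_eq]
  cases h : keyOf a <;> simp [PySem.Set.mem_add, eq_comm]

lemma nodup_bucketStep (seen : PySem.Set Int) (a : Int) (hnd : seen.Nodup) :
    (bucketStep seen a).Nodup := by
  rw [bucketStep_eq]
  cases keyOf a
  · exact hnd
  · apply PySem.Set.nodup_add
    exact hnd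

lemma keyOf_mem_allKeys {a k : Int} (h : keyOf a = some k) : k ∈ allKeys := by
  unfold keyOf at h
  split_ifs at h with h1 h2 <;> first | (simp_all [allKeys]; omega) | simp_all [allKeys]

lemma card_full {seen : PySem.Set Int} (hnd : seen.Nodup) (hsub : ∀ x ∈ seen, x ∈ allKeys) :
    seen.length = 10 ↔ ∀ k ∈ allKeys, k ∈ seen := by
  constructor
  · intro hlen k hk
    by_contra hk'
    have hsub' : seen ⊆ allKeys.erase k := by
      intro x hx
      rw [List.mem_erase_of_ne (by rintro rfl; exact hk' hx)]
      exact hsub x hx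
    have hle := (hnd.subperm hsub').length_le
    rw [List.length_erase_of_mem hk] at hle
    have h10 : allKeys.length = 10 := by decide
    omega
  · intro hall
    have h1 := (hnd.subperm hsub).length_le
    have h2 := ((by decide : allKeys.Nodup).subperm hall).length_le
    have h10 : allKeys.length = 10 := by decide
    omega

lemma keysOf_cons (dev : List (String × Int)) (rest : List (List (String × Int))) (k : Int) :
    k ∈ keysOf (dev :: rest) ↔ keyOf (ageOf dev) = some k ∨ k ∈ keysOf rest := by
  unfold keysOf
  cases h : keyOf (ageOf dev) <;> simp [h, eq_comm]

lemma altGo_true_iff (l : List (List (String × Int))) (seen : PySem.Set Int)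
    (hnd : seen.Nodup) (hsub : ∀ x ∈ seen, x ∈ allKeys) :
    altGo l seen = true ↔ (l ≠ [] ∧ ∀ k ∈ allKeys, k ∈ seen ∨ k ∈ keysOf l) := by
  induction l generalizing seen with
  | nil => simp [altGo]
  | cons dev rest ih =>
    rw [altGo]
    have hnd' : (bucketStep seen (ageOf dev)).Nodup := nodup_bucketStep _ _ hnd
    have hsub' : ∀ x ∈ bucketStep seen (ageOf dev), x ∈ allKeys := by
      intro x hx
      rcases (mem_bucketStep _ _ _).mp hx with hx | hx
      · exact hsub x hx
      · exact keyOf_mem_allKeys hx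
    have hcov : (∀ k ∈ allKeys, k ∈ seen ∨ k ∈ keysOf (dev :: rest)) ↔
        (∀ k ∈ allKeys, k ∈ bucketStep seen (ageOf dev) ∨ k ∈ keysOf rest) := by
      apply forall₂_congr
      intro k _
      rw [mem_bucketStep, keysOf_cons]
      tauto
    by_cases hlen : PySem.Set.len (bucketStep seen (ageOf dev)) = 10
    all_goals have hlenN : ((bucketStep seen (ageOf dev)).length = 10) ↔ PySem.Set.len (bucketStep seen (ageOf dev)) = 10 := by simp only [PySem.Set.len]; omega
    · rw [if_pos hlen]
      have hfull : ∀ k ∈ allKeys, k ∈ bucketStep seen (ageOf dev) :=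
        (card_full hnd' hsub').mp (hlenN.mpr hlen)
      simp only [true_iff, ne_eq, reduceCtorEq, not_false_eq_true, true_and, hcov]
      intro k hk
      exact Or.inl (hfull k hk)
    · rw [if_neg hlen, ih _ hnd' hsub']
      have hne : ¬ ∀ k ∈ allKeys, k ∈ bucketStep seen (ageOf dev) :=
        fun h => hlen (hlenN.mp ((card_full hnd' hsub').mpr h))
      constructor
      · rintro ⟨_, hall⟩
        exact ⟨by simp, hcov.mpr hall⟩
      · rintro ⟨_, hall⟩
        have hall' := hcov.mp hall
        refine ⟨?_, hall'⟩
        intro hrest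
        apply hne
        intro k hk
        rcases hall' k hk with hx | hx
        · exact hx
        · rw [hrest] at hx; simp [keysOf] at hx

lemma alt_true_iff (lst : List (List (String × Int))) :
    is_age_diverse_alt lst = true ↔ ∀ k ∈ allKeys, k ∈ keysOf lst := by
  unfold is_age_diverse_alt
  rw [altGo_true_iff lst PySem.Set.empty (by simp [PySem.Set.empty]) (by simp [PySem.Set.empty])]
  constructor
  · rintro ⟨_, hall⟩ k hk
    rcases hall k hk with hx | hx
    · simp [PySem.Set.empty] at hx
    · exact hx
  · intro hall
    constructor
    · intro hnil
      have := hall 1 (by decide)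
      rw [hnil] at this
      simp [keysOf] at this
    · intro k hk
      exact Or.inr (hall k hk)

lemma range_mem_iff_keyOf (a : Int) :
    ((13 ≤ a ∧ a < 20) ↔ keyOf a = some 1) ∧ ((20 ≤ a ∧ a < 30) ↔ keyOf a = some 2) ∧
    ((30 ≤ a ∧ a < 40) ↔ keyOf a = some 3) ∧ ((40 ≤ a ∧ a < 50) ↔ keyOf a = some 4) ∧
    ((50 ≤ a ∧ a < 60) ↔ keyOf a = some 5) ∧ ((60 ≤ a ∧ a < 70) ↔ keyOf a = some 6) ∧
    ((70 ≤ a ∧ a < 80) ↔ keyOf a = some 7) ∧ ((80 ≤ a ∧ a < 90) ↔ keyOf a = some 8) ∧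
    ((90 ≤ a ∧ a < 100) ↔ keyOf a = some 9) ∧ ((100 ≤ a ∧ a < 200) ↔ keyOf a = some 10) := by
  unfold keyOf
  split_ifs with h1 h2 <;> refine ⟨?_,?_,?_,?_,?_,?_,?_,?_,?_,?_⟩ <;> simp <;> omega

lemma a_true_iff (lst : List (List (String × Int))) :
    is_age_diverse lst = true ↔ ∀ k ∈ allKeys, k ∈ keysOf lst := by
  have hmem : ∀ k, k ∈ keysOf lst ↔ ∃ d ∈ lst, keyOf (ageOf d) = some k := by
    intro k; simp [keysOf]
  have e : ∀ (lo hi k : Int), (∀ a : Int, (lo ≤ a ∧ a < hi) ↔ keyOf a = some k) →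
      ((∃ x ∈ lst, lo ≤ ageOf x ∧ ageOf x < hi) ↔ k ∈ keysOf lst) := by
    intro lo hi k hiff
    rw [hmem]
    exact exists_congr fun d => and_congr_right fun _ => hiff (ageOf d)
  have e1 := e 13 20 1 (fun a => (range_mem_iff_keyOf a).1)
  have e2 := e 20 30 2 (fun a => (range_mem_iff_keyOf a).2.1)
  have e3 := e 30 40 3 (fun a => (range_mem_iff_keyOf a).2.2.1)
  have e4 := e 40 50 4 (fun a => (range_mem_iff_keyOf a).2.2.2.1)
  have e5 := e 50 60 5 (fun a => (range_mem_iff_keyOf a).2.2.2.2.1)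
  have e6 := e 60 70 6 (fun a => (range_mem_iff_keyOf a).2.2.2.2.2.1)
  have e7 := e 70 80 7 (fun a => (range_mem_iff_keyOf a).2.2.2.2.2.2.1)
  have e8 := e 80 90 8 (fun a => (range_mem_iff_keyOf a).2.2.2.2.2.2.2.1)
  have e9 := e 90 100 9 (fun a => (range_mem_iff_keyOf a).2.2.2.2.2.2.2.2.1)
  have e10 := e 100 200 10 (fun a => (range_mem_iff_keyOf a).2.2.2.2.2.2.2.2.2)
  unfold is_age_diverse ageGroups
  simp only [List.all_cons, List.all_nil, Bool.and_eq_true, Bool.and_true, List.any_eq_true,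
    decide_eq_true_eq, allKeys, List.mem_cons, List.not_mem_nil, or_false]
  constructor
  · rintro ⟨h1,h2,h3,h4,h5,h6,h7,h8,h9,h10⟩ k hk
    rcases hk with rfl|rfl|rfl|rfl|rfl|rfl|rfl|rfl|rfl|rfl
    exacts [e1.mp h1, e2.mp h2, e3.mp h3, e4.mp h4, e5.mp h5,
            e6.mp h6, e7.mp h7, e8.mp h8, e9.mp h9, e10.mp h10]
  · intro hall
    exact ⟨e1.mpr (hall 1 (by norm_num)), e2.mpr (hall 2 (by norm_num)),
           e3.mpr (hall 3 (by norm_num)), e4.mpr (hall 4 (by norm_num)),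
           e5.mpr (hall 5 (by norm_num)), e6.mpr (hall 6 (by norm_num)),
           e7.mpr (hall 7 (by norm_num)), e8.mpr (hall 8 (by norm_num)),
           e9.mpr (hall 9 (by norm_num)), e10.mpr (hall 10 (by norm_num))⟩

-- ===== VERDICT (by name: the statement is the Claim_ definition above) =====
theorem is_age_diverse_spec : Claim_equal_is_age_diverse := by
  intro lst _ _
  unfold Spec_is_age_diverse
  exact Bool.eq_iff_iff.mpr ((a_true_iff lst).trans (alt_true_iff lst).symm)
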